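-- pv_equiv track=rewrite | github.com/xJeTq/CS-115 | Lab 10/Life Lab/life.py | diagonlize
-- ===== SOURCE A (Python) =====
-- def createOneRow(width):
--     '''Returns one row of zeros of width "width"... You should use this in your createBoard(width, height) function.'''
--     row = []
--     for col in range(width):
--         row += [0]
--     return row
--
-- def createBoard(width, height):
--     '''Returns the proper height and width of the board, but in a 2D array.'''
--     board = []
--     for row in range(height):
--         board += [createOneRow(width)]
--     return board
--
-- def diagonlize(width, height):
--     '''Creates an empty board then modifies it so that it has a diagonal strip of "on" cells'''
--     B = createBoard(width, height)
--     for row in range(height):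
--         for col in range(width):
--             if row == col:
--                 B[row][col] = 1
--             else:
--                 B[row][col] = 0
--     return B
-- ===== SOURCE B (Python) =====
-- def createOneRow(width):
--     return [0] * width
--
-- def createBoard(width, height):
--     return [createOneRow(width) for _ in range(height)]
--
-- def diagonlize(width, height):
--     '''Zero board, then a single pass that turns on only the diagonal cells.'''
--     B = createBoard(width, height)
--     for i in range(min(width, height)):
--         B[i][i] = 1
--     return B
-- ===== Notes on version B (the rewrite author's own statement) =====
-- stated objective: simpler
-- what changed: A rebuilds every cell with a nested width x height loop over the zero board; B builds the zero board idiomatically ([0]*width, list comprehension) and then sets only the min(width,height) diagonal cells in one short loop.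
import Mathlib
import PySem

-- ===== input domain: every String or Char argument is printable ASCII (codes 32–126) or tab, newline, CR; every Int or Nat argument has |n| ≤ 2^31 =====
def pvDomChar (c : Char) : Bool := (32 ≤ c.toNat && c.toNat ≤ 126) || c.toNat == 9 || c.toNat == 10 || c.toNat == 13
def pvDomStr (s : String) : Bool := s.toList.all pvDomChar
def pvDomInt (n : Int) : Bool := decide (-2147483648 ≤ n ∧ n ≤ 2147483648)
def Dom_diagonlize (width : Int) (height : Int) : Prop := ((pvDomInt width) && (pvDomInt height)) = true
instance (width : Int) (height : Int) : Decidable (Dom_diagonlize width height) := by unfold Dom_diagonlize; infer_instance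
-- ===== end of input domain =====

-- B replaces A's full width×height rewrite of every cell by a single loop over the diagonal only (objective: simpler).

-- ===== PORT A =====
def diagonlizeRow (width : Int) : List Int :=
  (PySem.List.pyRange 0 width 1).foldl (fun row _ => row ++ [(0 : Int)]) []

def diagonlizeBoard (width : Int) (height : Int) : List (List Int) :=
  (PySem.List.pyRange 0 height 1).foldl (fun board _ => board ++ [diagonlizeRow width]) []

-- indices row/col come from range(height)/range(width), hence nonnegative and within the board
-- built with those very dimensions, so .toNat / set / getD are exact here (no wraparound, no IndexError)
def diagonlize (width : Int) (height : Int) : List (List Int) :=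
  (PySem.List.pyRange 0 height 1).foldl
    (fun B row =>
      (PySem.List.pyRange 0 width 1).foldl
        (fun B col =>
          B.set row.toNat ((B.getD row.toNat []).set col.toNat (if row = col then (1 : Int) else 0)))
        B)
    (diagonlizeBoard width height)

-- ===== PORT B =====
def diagonlizeAltRow (width : Int) : List Int :=
  List.replicate width.toNat 0          -- [0] * width

def diagonlizeAltBoard (width : Int) (height : Int) : List (List Int) :=
  (PySem.List.pyRange 0 height 1).map (fun _ => diagonlizeAltRow width)

-- i comes from range(min(width, height)): nonnegative and within both dimensions, so .toNat is exact
def diagonlize_alt (width : Int) (height : Int) : List (List Int) :=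
  (PySem.List.pyRange 0 (min width height) 1).foldl
    (fun B i => B.set i.toNat ((B.getD i.toNat []).set i.toNat 1))
    (diagonlizeAltBoard width height)

-- ===== PRECONDITION & SPEC =====
def Spec_diagonlize (width : Int) (height : Int) (out : List (List Int)) : Prop := out = diagonlize_alt width height
instance (width : Int) (height : Int) (out : List (List Int)) : Decidable (Spec_diagonlize width height out) := by unfold Spec_diagonlize; infer_instance

-- ===== CLAIM (what is proved, stated in full; the proofs are below) =====
def Claim_equal_diagonlize : Prop := ∀ (width : Int) (height : Int), Dom_diagonlize width height → Spec_diagonlize width height (diagonlize width height)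

-- ===== LEMMAS AND PROOFS =====

-- any fold whose step keeps the length keeps the length
lemma pv_len_fold {β γ : Type} (s : List β → γ → List β)
    (hs : ∀ B c, (s B c).length = B.length) :
    ∀ (xs : List γ) (B : List β), (xs.foldl s B).length = B.length := by
  intro xs
  induction xs with
  | nil => intro B; rfl
  | cons x xs ih => intro B; simp [List.foldl_cons, ih, hs]

-- writing cells 0..n-1 with values independent of the list: element-wise description
lemma pv_get_const {β : Type} (f : Nat → β) :
    ∀ (n : Nat) (l : List β), n ≤ l.length → ∀ (i : Nat),
      ((List.range n).foldl (fun r k => r.set k (f k)) l)[i]? =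
        if i < n then some (f i) else l[i]? := by
  intro n
  induction n with
  | zero => intro l _ i; simp
  | succ n ih =>
    intro l hn i
    rw [List.range_succ, List.foldl_append]
    simp only [List.foldl_cons, List.foldl_nil]
    have hlen : ((List.range n).foldl (fun r k => r.set k (f k)) l).length = l.length :=
      pv_len_fold _ (by intro B c; simp) _ _
    rw [List.getElem?_set]
    rcases eq_or_ne n i with h | h
    · subst h
      rw [if_pos rfl, hlen, if_pos (by omega), if_pos (by omega)]
    · rw [if_neg h, ih l (Nat.le_of_succ_le hn) i]
      rcases Nat.lt_or_ge i n with hin | hin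
      · rw [if_pos hin, if_pos (by omega)]
      · rw [if_neg (by omega), if_neg (by omega)]

-- a step that reads and rewrites cell i only: element-wise description
lemma pv_get_self {β : Type} (u : Nat → β → β) (d : β) :
    ∀ (n : Nat) (B : List β), n ≤ B.length → ∀ (i : Nat),
      ((List.range n).foldl (fun B k => B.set k (u k (B.getD k d))) B)[i]? =
        if i < n then some (u i (B.getD i d)) else B[i]? := by
  intro n
  induction n with
  | zero => intro B _ i; simp
  | succ n ih =>
    intro B hn i
    rw [List.range_succ, List.foldl_append]
    simp only [List.foldl_cons, List.foldl_nil]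
    have hnB : n < B.length := by omega
    have hlen : ((List.range n).foldl (fun B k => B.set k (u k (B.getD k d))) B).length = B.length :=
      pv_len_fold _ (by intro B c; simp) _ _
    have hRn : ((List.range n).foldl (fun B k => B.set k (u k (B.getD k d))) B).getD n d = B.getD n d := by
      rw [List.getD, List.getD, ih B (Nat.le_of_succ_le hn) n, if_neg (lt_irrefl n)]
    rw [hRn, List.getElem?_set]
    rcases eq_or_ne n i with h | h
    · subst h
      rw [if_pos rfl, hlen, if_pos (by omega), if_pos (by omega)]
    · rw [if_neg h, ih B (Nat.le_of_succ_le hn) i]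
      rcases Nat.lt_or_ge i n with hin | hin
      · rw [if_pos hin, if_pos (by omega)]
      · rw [if_neg (by omega), if_neg (by omega)]

-- hoisting A's inner column loop out of the board: it only touches row n
lemma pv_hoist {β : Type} (d : β) (g : β → Nat → β) (n : Nat) :
    ∀ (cols : List Nat) (B : List β), n < B.length →
      cols.foldl (fun B c => B.set n (g (B.getD n d) c)) B =
        B.set n (cols.foldl g (B.getD n d)) := by
  intro cols
  induction cols with
  | nil =>
    intro B hn
    simp [List.foldl_nil, List.getD, List.getElem?_eq_getElem hn, List.set_getElem_self]
  | cons c cs ih =>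
    intro B hn
    rw [List.foldl_cons, ih _ (by simpa using hn)]
    rw [List.foldl_cons, List.set_set]
    congr 2
    rw [List.getD, List.getD, List.getElem?_set, if_pos rfl, if_pos hn]
    rfl

-- A's nested double loop, element-wise: row i becomes the column loop applied to the old row i
lemma pv_A_main (W : Nat) :
    ∀ (n : Nat) (B : List (List Int)), n ≤ B.length → ∀ (i : Nat),
      ((List.range n).foldl
          (fun B k => (List.range W).foldl
            (fun B c => B.set k ((B.getD k []).set c (if k = c then (1 : Int) else 0))) B) B)[i]? =
        if i < n then
          some ((List.range W).foldl (fun row c => row.set c (if i = c then (1 : Int) else 0)) (B.getD i []))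
        else B[i]? := by
  intro n
  induction n with
  | zero => intro B _ i; simp
  | succ n ih =>
    intro B hn i
    rw [List.range_succ, List.foldl_append]
    simp only [List.foldl_cons, List.foldl_nil]
    have hstep : ∀ (B' : List (List Int)) (k : Nat), ((List.range W).foldl
        (fun B c => B.set k ((B.getD k []).set c (if k = c then (1 : Int) else 0))) B').length = B'.length := by
      intro B' k
      exact pv_len_fold _ (by intro B c; simp) _ _
    have hlen : ((List.range n).foldl
        (fun B k => (List.range W).foldl
          (fun B c => B.set k ((B.getD k []).set c (if k = c then (1 : Int) else 0))) B) B).length = B.length :=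
      pv_len_fold _ (fun B' k => hstep B' k) _ _
    have hnB : n < B.length := by omega
    rw [pv_hoist ([] : List Int) (fun row c => row.set c (if n = c then (1 : Int) else 0)) n _ _ (by omega)]
    have hRn : ((List.range n).foldl
        (fun B k => (List.range W).foldl
          (fun B c => B.set k ((B.getD k []).set c (if k = c then (1 : Int) else 0))) B) B).getD n [] = B.getD n [] := by
      rw [List.getD, List.getD, ih B (Nat.le_of_succ_le hn) n, if_neg (lt_irrefl n)]
    rw [hRn, List.getElem?_set]
    rcases eq_or_ne n i with h | h
    · subst h
      rw [if_pos rfl, hlen, if_pos (by omega), if_pos (by omega)]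
    · rw [if_neg h, ih B (Nat.le_of_succ_le hn) i]
      rcases Nat.lt_or_ge i n with hin | hin
      · rw [if_pos hin, if_pos (by omega)]
      · rw [if_neg (by omega), if_neg (by omega)]

-- both zero boards are height.toNat copies of the width.toNat zero row
lemma pv_boardA (width height : Int) :
    diagonlizeBoard width height = List.replicate height.toNat (List.replicate width.toNat (0 : Int)) := by
  have hrow : diagonlizeRow width = List.replicate width.toNat (0 : Int) := by
    unfold diagonlizeRow
    rw [PySem.List.foldl_append_singleton_eq_map]
    simp [PySem.List.pyRange_one, Function.comp_def, List.map_const']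
  unfold diagonlizeBoard
  rw [PySem.List.foldl_append_singleton_eq_map]
  simp [PySem.List.pyRange_one, Function.comp_def, List.map_const', hrow]

lemma pv_boardB (width height : Int) :
    diagonlizeAltBoard width height = List.replicate height.toNat (List.replicate width.toNat (0 : Int)) := by
  unfold diagonlizeAltBoard diagonlizeAltRow
  simp [PySem.List.pyRange_one, Function.comp_def, List.map_const']

-- ===== VERDICT (by name: the statement is the Claim_ definition above) =====
theorem diagonlize_spec : Claim_equal_diagonlize := by
  intro width height _
  unfold Spec_diagonlize
  have hA : diagonlize width height =
      (List.range height.toNat).foldl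
        (fun B k => (List.range width.toNat).foldl
          (fun B c => B.set k ((B.getD k []).set c (if k = c then (1 : Int) else 0))) B)
        (List.replicate height.toNat (List.replicate width.toNat (0 : Int))) := by
    unfold diagonlize
    rw [pv_boardA]
    simp only [PySem.List.pyRange_one, List.foldl_map, Int.sub_zero, zero_add,
      Int.toNat_natCast, Nat.cast_inj]
  have hB : diagonlize_alt width height =
      (List.range ((min width height).toNat)).foldl
        (fun B k => B.set k ((B.getD k []).set k 1))
        (List.replicate height.toNat (List.replicate width.toNat (0 : Int))) := by
    unfold diagonlize_alt
    rw [pv_boardB]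
    simp only [PySem.List.pyRange_one, List.foldl_map, Int.sub_zero, zero_add,
      Int.toNat_natCast]
  rw [hA, hB]
  apply List.ext_getElem?
  intro i
  rw [pv_A_main width.toNat height.toNat _ (by simp) i,
      pv_get_self (fun k row => row.set k 1) ([] : List Int) ((min width height).toNat) _
        (by simp) i]
  by_cases hiH : i < height.toNat
  · have hgd : (List.replicate height.toNat (List.replicate width.toNat (0 : Int))).getD i [] =
        List.replicate width.toNat (0 : Int) := by
      rw [List.getD, List.getElem?_eq_getElem (by simpa using hiH)]
      simp
    rw [if_pos hiH, hgd]
    by_cases hiM : i < (min width height).toNat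
    · rw [if_pos hiM]
      refine congrArg some ?_
      -- row i on the diagonal: the column loop writes 1 at i and 0 elsewhere = zero row with cell i set to 1
      apply List.ext_getElem?
      intro j
      rw [pv_get_const (fun c => if i = c then (1 : Int) else 0) width.toNat _ (by simp) j,
          List.getElem?_set, List.getElem?_replicate, List.length_replicate]
      have hiW : i < width.toNat := by omega
      by_cases hij : i = j
      · subst hij; simp [hiW]
      · simp [hij]
    · rw [if_neg hiM, List.getElem?_replicate, if_pos hiH]
      refine congrArg some ?_
      -- row below the diagonal strip: then width.toNat ≤ i, so the column loop writes only zeros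
      apply List.ext_getElem?
      intro j
      rw [pv_get_const (fun c => if i = c then (1 : Int) else 0) width.toNat _ (by simp) j,
          List.getElem?_replicate]
      by_cases hjW : j < width.toNat
      · simp [hjW, show ¬ i = j by omega]
      · simp [hjW]
  · rw [if_neg hiH, if_neg (by omega)]
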